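-- pv_equiv track=rewrite | github.com/shubhamkaushal765/ac_roster | acroster/assignment_engine.py | _sort_officer_schedule
-- ===== SOURCE A (Python) =====
-- from typing import Dict, List, Tuple
--
-- def _sort_officer_schedule(officer_schedule: Dict) -> Dict:
--     """Sort officer schedule by type (M, S, OT) and number."""
--     prefix_order = {"M": 0, "S": 1, "OT": 2}
--
--     def sort_key(k):
--         k = str(k)
--         if k.startswith("OT"):
--             prefix = "OT"
--             num_part = k[2:]
--         else:
--             prefix = k[0]
--             num_part = k[1:]
--         try:
--             num_val = int(num_part)
--         except ValueError:
--             num_val = float("inf")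
--         return (prefix_order.get(prefix, 99), num_val)
--
--     sorted_keys = sorted(officer_schedule.keys(), key=sort_key)
--     return {k: officer_schedule[k] for k in sorted_keys}
-- ===== SOURCE B (Python) =====
-- def _sort_officer_schedule(officer_schedule):
--     """Bucket keys by type prefix in one pass, then stable-sort each bucket by
--     numeric suffix and concatenate the buckets in rank order."""
--     buckets = ([], [], [], [])  # M, S, OT, everything else
--     for k, v in officer_schedule.items():
--         key = str(k)
--         if key.startswith("OT"):
--             idx, suffix = 2, key[2:]
--         elif key[:1] == "M":
--             idx, suffix = 0, key[1:]
--         elif key[:1] == "S":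
--             idx, suffix = 1, key[1:]
--         else:
--             idx, suffix = 3, key[1:]
--         try:
--             num = (0, int(suffix))
--         except ValueError:
--             num = (1, 0)
--         buckets[idx].append((num, k, v))
--     result = {}
--     for bucket in buckets:
--         for _, k, v in sorted(bucket, key=lambda e: e[0]):
--             result[k] = v
--     return result
-- ===== Notes on version B (the rewrite author's own statement) =====
-- stated objective: alternative
-- what changed: B partitions the entries into four prefix-class buckets (M, S, OT, other) in one pass, stable-sorts each bucket by its numeric suffix alone, and concatenates the buckets, instead of A's single global sort of the key list by a (rank, number) tuple key followed by a dict-rebuild with per-key lookups.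
import Mathlib
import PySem

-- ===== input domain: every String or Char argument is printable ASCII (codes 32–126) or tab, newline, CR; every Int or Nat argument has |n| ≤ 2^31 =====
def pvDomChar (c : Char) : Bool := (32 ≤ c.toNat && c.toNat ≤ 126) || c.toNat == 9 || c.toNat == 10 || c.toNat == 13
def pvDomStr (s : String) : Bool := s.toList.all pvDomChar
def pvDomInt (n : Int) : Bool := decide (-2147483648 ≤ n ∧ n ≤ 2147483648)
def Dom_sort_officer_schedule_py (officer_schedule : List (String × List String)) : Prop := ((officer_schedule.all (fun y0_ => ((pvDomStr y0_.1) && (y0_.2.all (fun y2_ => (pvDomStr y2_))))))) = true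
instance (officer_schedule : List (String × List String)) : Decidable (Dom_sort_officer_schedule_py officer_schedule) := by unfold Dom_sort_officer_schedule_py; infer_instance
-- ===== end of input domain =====

-- B buckets the entries by prefix class and sorts each bucket by numeric suffix, instead of A's
-- single global tuple-key sort of the keys plus a dict rebuild (objective: alternative).
-- Equivalence is about the RETURN value; neither program mutates its argument.

-- ===== PORT A =====
-- prefix_order = {"M": 0, "S": 1, "OT": 2}
def pvPrefixOrder : PySem.Dict (List Char) Int :=
  PySem.Dict.mk [(['M'], 0), (['S'], 1), (['O','T'], 2)]

-- sort_key(k) : returns (prefix_order.get(prefix, 99), num_val) with num_val = int(num_part) or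
-- float("inf"); the number is modelled as Option Int (none = inf).
def pvSortKeyA (k : String) : Int × Option Int :=
  let cs := k.toList
  let pn : List Char × List Char :=
    if PySem.Chars.startswith cs ['O','T'] then (['O','T'], cs.drop 2)
    else (cs.take 1, cs.drop 1)
  (PySem.Dict.getD pvPrefixOrder pn.1 99, PySem.Int.ofChars? pn.2)

-- Python compares the key tuples (rank, num) lexicographically with num ∈ ℤ ∪ {inf}.  That order is
-- encoded EXACTLY by the Int pair (2*rank + tag, val) with tag = 0 for an int, 1 for inf (val 0):
-- distinct ranks (0,1,2,99) are ≥ 1 apart so 2*rank dominates tag, equal ranks compare (tag, val),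
-- and inf ties (tag 1, val 0) are ties, as in Python.
def pvKey1A (k : String) : Int :=
  2 * (pvSortKeyA k).1 + (match (pvSortKeyA k).2 with | some _ => 0 | none => 1)
def pvKey2A (k : String) : Int := ((pvSortKeyA k).2).getD 0

-- sorted(officer_schedule.keys(), key=sort_key) then {k: officer_schedule[k] for k in sorted_keys};
-- the comprehension over the (distinct, by Pre_) sorted keys is the association list in that order.
def sort_officer_schedule_py (officer_schedule : List (String × List String)) : List (String × List String) :=
  let sortedKeys := PySem.List.sorted2 (officer_schedule.map Prod.fst) pvKey1A pvKey2A
  sortedKeys.map (fun k => (k, PySem.Dict.getD (PySem.Dict.mk officer_schedule) k []))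

-- ===== PORT B =====
-- bucket index (0 = M, 1 = S, 2 = OT, 3 = other) and numeric suffix of a key
def pvIdxSuffixB (k : String) : Nat × List Char :=
  let cs := k.toList
  if PySem.Chars.startswith cs ['O','T'] then (2, cs.drop 2)
  else if cs.take 1 = ['M'] then (0, cs.drop 1)
  else if cs.take 1 = ['S'] then (1, cs.drop 1)
  else (3, cs.drop 1)

-- num = (0, int(suffix)) or (1, 0) on ValueError
def pvNumB (k : String) : Int × Int :=
  match PySem.Int.ofChars? (pvIdxSuffixB k).2 with
  | some n => (0, n)
  | none => (1, 0)

-- decorated bucket element: ((tag, value), (key, schedule))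
def pvDecB (kv : String × List String) : (Int × Int) × (String × List String) :=
  (pvNumB kv.1, kv)

-- sorted(bucket, key=lambda e: e[0]) then emit the (k, v) pairs
def pvEmitB (b : List ((Int × Int) × (String × List String))) : List (String × List String) :=
  (PySem.List.sorted2 b (fun e => e.1.1) (fun e => e.1.2)).map (fun e => e.2)

-- one pass filling the four buckets, then per-bucket sort and concatenation; writing the pairs into
-- the result dict over the (distinct, by Pre_) keys is the association list in that order.
def sort_officer_schedule_py_alt (officer_schedule : List (String × List String)) : List (String × List String) :=
  let bs := officer_schedule.foldl
    (fun (acc : (List ((Int × Int) × (String × List String)) × List ((Int × Int) × (String × List String))) ×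
                (List ((Int × Int) × (String × List String)) × List ((Int × Int) × (String × List String)))) kv =>
      let i := (pvIdxSuffixB kv.1).1
      if i = 0 then ((acc.1.1 ++ [pvDecB kv], acc.1.2), acc.2)
      else if i = 1 then ((acc.1.1, acc.1.2 ++ [pvDecB kv]), acc.2)
      else if i = 2 then (acc.1, (acc.2.1 ++ [pvDecB kv], acc.2.2))
      else (acc.1, (acc.2.1, acc.2.2 ++ [pvDecB kv])))
    (([], []), ([], []))
  (pvEmitB bs.1.1 ++ pvEmitB bs.1.2) ++ (pvEmitB bs.2.1 ++ pvEmitB bs.2.2)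

-- ===== PRECONDITION & SPEC =====
-- Pre_: the input is a genuine dict (distinct keys — A's argument type) and no key is the empty
-- string (on "" Python's k[0] raises IndexError).
def Pre_sort_officer_schedule_py (officer_schedule : List (String × List String)) : Prop :=
  (officer_schedule.map Prod.fst).Nodup ∧ ∀ kv ∈ officer_schedule, kv.1 ≠ ""
instance (officer_schedule : List (String × List String)) : Decidable (Pre_sort_officer_schedule_py officer_schedule) := by
  unfold Pre_sort_officer_schedule_py; infer_instance

def pvWitness_sort_officer_schedule_py : (List (String × List String)) :=
  [("M2", ["a"]), ("OT1", []), ("S10", ["b", "c"]), ("X", ["d"])]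

def Spec_sort_officer_schedule_py (officer_schedule : List (String × List String)) (out : List (String × List String)) : Prop := out = sort_officer_schedule_py_alt officer_schedule
instance (officer_schedule : List (String × List String)) (out : List (String × List String)) : Decidable (Spec_sort_officer_schedule_py officer_schedule out) := by unfold Spec_sort_officer_schedule_py; infer_instance

-- ===== CLAIM (what is proved, stated in full; the proofs are below) =====
def Claim_equal_sort_officer_schedule_py : Prop := ∀ (officer_schedule : List (String × List String)), Dom_sort_officer_schedule_py officer_schedule → Pre_sort_officer_schedule_py officer_schedule → Spec_sort_officer_schedule_py officer_schedule (sort_officer_schedule_py officer_schedule)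

-- ===== LEMMAS AND PROOFS =====

-- insertion-sort loop of sorted/sorted2, with an explicit accumulator
def pvIns {α : Type} (bf : α → α → Bool) (acc : List α) (l : List α) : List α :=
  l.foldl (fun a x => PySem.List.insertBy bf x a) acc

-- the comparison sorted2 uses, as a named function
def pvLt2 {α κ₁ κ₂ : Type} [LT κ₁] [DecidableLT κ₁] [LT κ₂] [DecidableLT κ₂]
    (k1 : α → κ₁) (k2 : α → κ₂) : α → α → Bool :=
  fun a b => decide (k1 a < k1 b) || (!decide (k1 b < k1 a) && decide (k2 a < k2 b))

theorem sorted2_eq_pvIns {α κ₁ κ₂ : Type} [LT κ₁] [DecidableLT κ₁] [LT κ₂] [DecidableLT κ₂]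
    (xs : List α) (k1 : α → κ₁) (k2 : α → κ₂) :
    PySem.List.sorted2 xs k1 k2 = pvIns (pvLt2 k1 k2) [] xs := rfl

theorem pvIns_mem {α : Type} (bf : α → α → Bool) (l : List α) :
    ∀ (acc : List α) (x : α), x ∈ pvIns bf acc l ↔ x ∈ acc ∨ x ∈ l := by
  induction l with
  | nil => intro acc x; simp [pvIns]
  | cons y t ih =>
    intro acc x
    have := ih (PySem.List.insertBy bf y acc) x
    simp only [pvIns, List.foldl_cons] at this ⊢
    rw [this, PySem.List.mem_insertBy]
    simp only [List.mem_cons]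
    tauto

theorem insertBy_congr {α : Type} (bf bf' : α → α → Bool) (x : α) (ys : List α)
    (h : ∀ y ∈ ys, bf x y = bf' x y) : PySem.List.insertBy bf x ys = PySem.List.insertBy bf' x ys := by
  induction ys with
  | nil => rfl
  | cons y t ih =>
    simp only [PySem.List.insertBy]
    rw [h y (by simp)]
    by_cases hb : bf' x y = true
    · simp [hb]
    · simp only [Bool.not_eq_true] at hb
      simp [hb, ih (fun z hz => h z (by simp [hz]))]

theorem pvIns_congr {α : Type} (bf bf' : α → α → Bool) (l : List α) :
    ∀ (acc : List α), (∀ a ∈ l, ∀ b, b ∈ l ∨ b ∈ acc → bf a b = bf' a b) →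
    pvIns bf acc l = pvIns bf' acc l := by
  induction l with
  | nil => intro acc _; rfl
  | cons y t ih =>
    intro acc h
    simp only [pvIns, List.foldl_cons]
    have h1 : PySem.List.insertBy bf y acc = PySem.List.insertBy bf' y acc :=
      insertBy_congr _ _ _ _ (fun z hz => h y (by simp) z (Or.inr hz))
    rw [h1]
    exact ih (PySem.List.insertBy bf' y acc) (fun a ha b hb => by
      refine h a (by simp [ha]) b ?_
      rcases hb with hb | hb
      · exact Or.inl (by simp [hb])
      · rw [PySem.List.mem_insertBy] at hb
        rcases hb with rfl | hb
        · exact Or.inl (by simp)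
        · exact Or.inr hb)

theorem insertBy_map {α β : Type} (bf : β → β → Bool) (f : α → β) (x : α) (ys : List α) :
    PySem.List.insertBy bf (f x) (ys.map f) = (PySem.List.insertBy (fun a b => bf (f a) (f b)) x ys).map f := by
  induction ys with
  | nil => rfl
  | cons y t ih =>
    simp only [List.map_cons, PySem.List.insertBy]
    by_cases hb : bf (f x) (f y) = true
    · simp [hb]
    · simp only [Bool.not_eq_true] at hb
      simp [hb, ih]

theorem pvIns_map {α β : Type} (bf : β → β → Bool) (f : α → β) (l : List α) :
    ∀ (acc : List α), pvIns bf (acc.map f) (l.map f) = (pvIns (fun a b => bf (f a) (f b)) acc l).map f := by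
  induction l with
  | nil => intro acc; rfl
  | cons y t ih =>
    intro acc
    simp only [pvIns, List.map_cons, List.foldl_cons] at ih ⊢
    rw [insertBy_map, ih]

theorem insertBy_append_right {α : Type} (bf : α → α → Bool) (x : α) (a b : List α)
    (h : ∀ y ∈ b, bf x y = true) : PySem.List.insertBy bf x (a ++ b) = PySem.List.insertBy bf x a ++ b := by
  induction a with
  | nil =>
    cases b with
    | nil => rfl
    | cons y t => simp [PySem.List.insertBy, h y (by simp)]
  | cons z a' ih =>
    simp only [List.cons_append, PySem.List.insertBy]
    by_cases hb : bf x z = true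
    · simp [hb]
    · simp only [Bool.not_eq_true] at hb
      simp [hb, ih]

theorem insertBy_append_left {α : Type} (bf : α → α → Bool) (x : α) (a b : List α)
    (h : ∀ y ∈ a, bf x y = false) : PySem.List.insertBy bf x (a ++ b) = a ++ PySem.List.insertBy bf x b := by
  induction a with
  | nil => rfl
  | cons z a' ih =>
    simp only [List.cons_append, PySem.List.insertBy, h z (by simp)]
    simp [ih (fun y hy => h y (by simp [hy]))]

theorem pvIns_split {α : Type} (bf : α → α → Bool) (cls : α → Nat) (hc : ∀ x, cls x ≤ 3)
    (hlt : ∀ a b, cls a < cls b → bf a b = true) (hgt : ∀ a b, cls b < cls a → bf a b = false)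
    (l : List α) : ∀ (a0 a1 a2 a3 : List α),
    (∀ y ∈ a0, cls y = 0) → (∀ y ∈ a1, cls y = 1) → (∀ y ∈ a2, cls y = 2) → (∀ y ∈ a3, cls y = 3) →
    pvIns bf (a0 ++ a1 ++ a2 ++ a3) l =
      pvIns bf a0 (l.filter (fun x => cls x == 0)) ++ pvIns bf a1 (l.filter (fun x => cls x == 1)) ++
      pvIns bf a2 (l.filter (fun x => cls x == 2)) ++ pvIns bf a3 (l.filter (fun x => cls x == 3)) := by
  induction l with
  | nil => intro a0 a1 a2 a3 _ _ _ _; rfl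
  | cons x t ih =>
    intro a0 a1 a2 a3 h0 h1 h2 h3
    have hcx := hc x
    have hpure : ∀ (a : List α) (i : Nat), cls x = i → (∀ y ∈ a, cls y = i) →
        ∀ y ∈ PySem.List.insertBy bf x a, cls y = i := by
      intro a i hx ha y hy
      rw [PySem.List.mem_insertBy] at hy
      rcases hy with rfl | hy
      · exact hx
      · exact ha y hy
    simp only [pvIns, List.foldl_cons, List.filter_cons]
    rcases (show cls x = 0 ∨ cls x = 1 ∨ cls x = 2 ∨ cls x = 3 by omega) with hx | hx | hx | hx
    · have e1 : PySem.List.insertBy bf x (a0 ++ a1 ++ a2 ++ a3)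
          = PySem.List.insertBy bf x a0 ++ a1 ++ a2 ++ a3 := by
        rw [List.append_assoc, List.append_assoc,
          insertBy_append_right bf x a0 (a1 ++ (a2 ++ a3)) (by
            intro y hy
            apply hlt
            rw [hx]
            simp only [List.mem_append] at hy
            rcases hy with hy | hy | hy
            · rw [h1 y hy]; omega
            · rw [h2 y hy]; omega
            · rw [h3 y hy]; omega)]
        simp [List.append_assoc]
      rw [e1]
      have := ih (PySem.List.insertBy bf x a0) a1 a2 a3
        (hpure a0 0 hx h0) h1 h2 h3
      simp only [pvIns] at this ⊢
      simp only [hx]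
      norm_num
      simp only [List.append_assoc] at this ⊢
      exact this
    · have e1 : PySem.List.insertBy bf x (a0 ++ a1 ++ a2 ++ a3)
          = a0 ++ PySem.List.insertBy bf x a1 ++ a2 ++ a3 := by
        rw [List.append_assoc, List.append_assoc,
          insertBy_append_left bf x a0 (a1 ++ (a2 ++ a3)) (by
            intro y hy; apply hgt; have hcy := h0 y hy; omega),
          insertBy_append_right bf x a1 (a2 ++ a3) (by
            intro y hy
            apply hlt
            rw [hx]
            simp only [List.mem_append] at hy
            rcases hy with hy | hy
            · rw [h2 y hy]; omega
            · rw [h3 y hy]; omega)]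
        simp [List.append_assoc]
      rw [e1]
      have := ih a0 (PySem.List.insertBy bf x a1) a2 a3
        h0 (hpure a1 1 hx h1) h2 h3
      simp only [pvIns] at this ⊢
      simp only [hx]
      norm_num
      simp only [List.append_assoc] at this ⊢
      exact this
    · have e1 : PySem.List.insertBy bf x (a0 ++ a1 ++ a2 ++ a3)
          = a0 ++ a1 ++ PySem.List.insertBy bf x a2 ++ a3 := by
        have hfalse : ∀ y ∈ a0 ++ a1, bf x y = false := by
          intro y hy
          apply hgt
          simp only [List.mem_append] at hy
          rcases hy with hy | hy
          · have hcy := h0 y hy; omega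
          · have hcy := h1 y hy; omega
        rw [show a0 ++ a1 ++ a2 ++ a3 = (a0 ++ a1) ++ (a2 ++ a3) by simp [List.append_assoc],
          insertBy_append_left bf x (a0 ++ a1) (a2 ++ a3) hfalse,
          insertBy_append_right bf x a2 a3 (by
            intro y hy; apply hlt; have hcy := h3 y hy; omega)]
        simp [List.append_assoc]
      rw [e1]
      have := ih a0 a1 (PySem.List.insertBy bf x a2) a3
        h0 h1 (hpure a2 2 hx h2) h3
      simp only [pvIns] at this ⊢
      simp only [hx]
      norm_num
      simp only [List.append_assoc] at this ⊢
      exact this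
    · have e1 : PySem.List.insertBy bf x (a0 ++ a1 ++ a2 ++ a3)
          = a0 ++ a1 ++ a2 ++ PySem.List.insertBy bf x a3 := by
        have hfalse : ∀ y ∈ (a0 ++ a1) ++ a2, bf x y = false := by
          intro y hy
          apply hgt
          simp only [List.mem_append] at hy
          rcases hy with (hy | hy) | hy
          · have hcy := h0 y hy; omega
          · have hcy := h1 y hy; omega
          · have hcy := h2 y hy; omega
        rw [show a0 ++ a1 ++ a2 ++ a3 = ((a0 ++ a1) ++ a2) ++ a3 by simp [List.append_assoc],
          insertBy_append_left bf x ((a0 ++ a1) ++ a2) a3 hfalse]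
      rw [e1]
      have := ih a0 a1 a2 (PySem.List.insertBy bf x a3)
        h0 h1 h2 (hpure a3 3 hx h3)
      simp only [pvIns] at this ⊢
      simp only [hx]
      norm_num
      simp only [List.append_assoc] at this ⊢
      exact this

-- prefix class of an entry (B's bucket index)
def pvCls (kv : String × List String) : Nat := (pvIdxSuffixB kv.1).1

-- A's rank for each bucket index
def pvRankOf (i : Nat) : Int := if i = 0 then 0 else if i = 1 then 1 else if i = 2 then 2 else 99

-- A's comparison lifted to entries, and B's in-bucket comparison
def pvBfA (a b : String × List String) : Bool := pvLt2 pvKey1A pvKey2A a.1 b.1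
def pvBfB (a b : String × List String) : Bool :=
  pvLt2 (fun kv : String × List String => (pvNumB kv.1).1) (fun kv : String × List String => (pvNumB kv.1).2) a b

theorem pvCls_le (kv : String × List String) : pvCls kv ≤ 3 := by
  unfold pvCls pvIdxSuffixB
  dsimp only
  split_ifs <;> omega

theorem pvRank_eq (k : String) : (pvSortKeyA k).1 = pvRankOf ((pvIdxSuffixB k).1) := by
  unfold pvSortKeyA pvIdxSuffixB pvRankOf pvPrefixOrder
  dsimp only
  by_cases hOT : PySem.Chars.startswith k.toList ['O','T'] = true
  · simp [hOT, PySem.Dict.getD_eq_get?_getD, PySem.Dict.get?_mk_cons]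
  · simp only [hOT, if_false, Bool.false_eq_true]
    by_cases hM : k.toList.take 1 = ['M']
    · simp [hM, PySem.Dict.getD_eq_get?_getD, PySem.Dict.get?_mk_cons]
    · by_cases hS : k.toList.take 1 = ['S']
      · simp [hS, hM, PySem.Dict.getD_eq_get?_getD, PySem.Dict.get?_mk_cons]
      · simp only [hM, hS, if_false]
        cases hcs : k.toList with
        | nil => simp [PySem.Dict.getD_eq_get?_getD, PySem.Dict.get?_mk_cons, PySem.Dict.get?]
        | cons c t =>
          rw [hcs] at hM hS
          simp only [List.take_succ_cons, List.take_zero] at hM hS ⊢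
          have hM' : ((['M'] : List Char) == [c]) = false :=
            beq_eq_false_iff_ne.mpr (fun h => hM h.symm)
          have hS' : ((['S'] : List Char) == [c]) = false :=
            beq_eq_false_iff_ne.mpr (fun h => hS h.symm)
          have hOT' : ((['O','T'] : List Char) == [c]) = false :=
            beq_eq_false_iff_ne.mpr (fun h => by simp at h)
          simp [PySem.Dict.getD_eq_get?_getD, PySem.Dict.get?_mk_cons, PySem.Dict.get?, hM', hS', hOT']

theorem pvSuffix_eq (k : String) : (pvSortKeyA k).2 = PySem.Int.ofChars? ((pvIdxSuffixB k).2) := by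
  unfold pvSortKeyA pvIdxSuffixB
  dsimp only
  split_ifs <;> rfl

theorem pvKey1_eq (k : String) : pvKey1A k = 2 * pvRankOf ((pvIdxSuffixB k).1) + (pvNumB k).1 := by
  unfold pvKey1A pvNumB
  rw [pvRank_eq, pvSuffix_eq]
  cases PySem.Int.ofChars? ((pvIdxSuffixB k).2) <;> rfl

theorem pvKey2_eq (k : String) : pvKey2A k = (pvNumB k).2 := by
  unfold pvKey2A pvNumB
  rw [pvSuffix_eq]
  cases PySem.Int.ofChars? ((pvIdxSuffixB k).2) <;> rfl

theorem pvTag01 (k : String) : (pvNumB k).1 = 0 ∨ (pvNumB k).1 = 1 := by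
  unfold pvNumB
  cases PySem.Int.ofChars? ((pvIdxSuffixB k).2) <;> simp

theorem pvRankOf_mono {i j : Nat} (h : i < j) (hj : j ≤ 3) : pvRankOf i < pvRankOf j := by
  unfold pvRankOf
  split_ifs <;> omega

theorem pvKey1_lt (a b : String × List String) (h : pvCls a < pvCls b) : pvKey1A a.1 < pvKey1A b.1 := by
  rw [pvKey1_eq, pvKey1_eq]
  have hm := pvRankOf_mono h (pvCls_le b)
  unfold pvCls at hm
  rcases pvTag01 a.1 with h1 | h1 <;> rcases pvTag01 b.1 with h2 | h2 <;>
    rw [h1, h2] <;> omega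

theorem pvBfA_true (a b : String × List String) (h : pvCls a < pvCls b) : pvBfA a b = true := by
  unfold pvBfA pvLt2
  simp [pvKey1_lt a b h]

theorem pvBfA_false (a b : String × List String) (h : pvCls b < pvCls a) : pvBfA a b = false := by
  unfold pvBfA pvLt2
  have hlt := pvKey1_lt b a h
  have h1 : decide (pvKey1A a.1 < pvKey1A b.1) = false := decide_eq_false (not_lt_of_gt hlt)
  have h2 : decide (pvKey1A b.1 < pvKey1A a.1) = true := decide_eq_true hlt
  rw [h1, h2]
  simp

theorem pvBfA_eq_pvBfB (a b : String × List String) (h : pvCls a = pvCls b) : pvBfA a b = pvBfB a b := by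
  unfold pvBfA pvBfB pvLt2
  unfold pvCls at h
  have e1 : decide (pvKey1A a.1 < pvKey1A b.1) = decide ((pvNumB a.1).1 < (pvNumB b.1).1) := by
    apply decide_eq_decide.mpr
    rw [pvKey1_eq, pvKey1_eq, h]
    omega
  have e2 : decide (pvKey1A b.1 < pvKey1A a.1) = decide ((pvNumB b.1).1 < (pvNumB a.1).1) := by
    apply decide_eq_decide.mpr
    rw [pvKey1_eq, pvKey1_eq, h]
    omega
  rw [e1, e2, pvKey2_eq, pvKey2_eq]

-- the bucket-filling loop of B builds the four decorated filtered sublists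
theorem pvBuckets_eq (l : List (String × List String)) :
    ∀ (acc : (List ((Int × Int) × (String × List String)) × List ((Int × Int) × (String × List String))) ×
             (List ((Int × Int) × (String × List String)) × List ((Int × Int) × (String × List String)))),
    l.foldl
      (fun acc kv =>
        let i := (pvIdxSuffixB kv.1).1
        if i = 0 then ((acc.1.1 ++ [pvDecB kv], acc.1.2), acc.2)
        else if i = 1 then ((acc.1.1, acc.1.2 ++ [pvDecB kv]), acc.2)
        else if i = 2 then (acc.1, (acc.2.1 ++ [pvDecB kv], acc.2.2))
        else (acc.1, (acc.2.1, acc.2.2 ++ [pvDecB kv]))) acc =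
    ((acc.1.1 ++ (l.filter (fun kv => pvCls kv == 0)).map pvDecB,
      acc.1.2 ++ (l.filter (fun kv => pvCls kv == 1)).map pvDecB),
     (acc.2.1 ++ (l.filter (fun kv => pvCls kv == 2)).map pvDecB,
      acc.2.2 ++ (l.filter (fun kv => pvCls kv == 3)).map pvDecB)) := by
  induction l with
  | nil => intro acc; simp
  | cons kv t ih =>
    intro acc
    have hle := pvCls_le kv
    simp only [List.foldl_cons, List.filter_cons]
    rcases (show pvCls kv = 0 ∨ pvCls kv = 1 ∨ pvCls kv = 2 ∨ pvCls kv = 3 by omega) with hx | hx | hx | hx <;>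
      · have hx' : (pvIdxSuffixB kv.1).1 = pvCls kv := rfl
        rw [ih]
        simp [hx' , hx]

-- per-bucket emit: sort the decorated bucket by its (tag, value) key and strip the decoration
theorem pvEmit_eq (l : List (String × List String)) :
    pvEmitB (l.map pvDecB) = pvIns pvBfB [] l := by
  unfold pvEmitB
  rw [sorted2_eq_pvIns]
  rw [show pvIns (pvLt2 (fun e : (Int × Int) × (String × List String) => e.1.1)
        (fun e : (Int × Int) × (String × List String) => e.1.2)) [] (List.map pvDecB l)
      = (pvIns pvBfB [] l).map pvDecB
    from pvIns_map _ pvDecB l []]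
  rw [List.map_map]
  have : ((fun e : (Int × Int) × (String × List String) => e.2) ∘ pvDecB) = id := rfl
  rw [this, List.map_id]

-- ===== VERDICT (by name: the statement is the Claim_ definition above) =====
theorem sort_officer_schedule_py_spec : Claim_equal_sort_officer_schedule_py := by
  intro d _ hpre
  unfold Spec_sort_officer_schedule_py
  obtain ⟨hnd, -⟩ := hpre
  -- A's side: sort of the key list, then per-key lookup
  show (PySem.List.sorted2 (d.map Prod.fst) pvKey1A pvKey2A).map
      (fun k => (k, PySem.Dict.getD (PySem.Dict.mk d) k [])) = _
  rw [sorted2_eq_pvIns]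
  rw [show pvIns (pvLt2 pvKey1A pvKey2A) [] (List.map Prod.fst d) = (pvIns pvBfA [] d).map Prod.fst
    from pvIns_map (pvLt2 pvKey1A pvKey2A) Prod.fst d []]
  rw [List.map_map]
  have hmapid : (pvIns pvBfA [] d).map
      ((fun k => (k, PySem.Dict.getD (PySem.Dict.mk d) k [])) ∘ Prod.fst) = pvIns pvBfA [] d := by
    have h1 : (pvIns pvBfA [] d).map
        ((fun k => (k, PySem.Dict.getD (PySem.Dict.mk d) k [])) ∘ Prod.fst)
        = (pvIns pvBfA [] d).map id := by
      apply List.map_congr_left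
      intro kv hkv
      have hm : kv ∈ d := by
        rcases (pvIns_mem pvBfA d [] kv).mp hkv with h | h
        · cases h
        · exact h
      have hg : PySem.Dict.getD (PySem.Dict.mk d) kv.1 [] = kv.2 :=
        PySem.Dict.getD_of_mem_items (d := PySem.Dict.mk d) hm hnd []
      simp [hg]
    rw [h1, List.map_id]
  rw [hmapid]
  -- split A's single sort into the four class buckets
  have hsplit := pvIns_split pvBfA pvCls pvCls_le pvBfA_true pvBfA_false d [] [] [] []
      (by intro y h; cases h) (by intro y h; cases h) (by intro y h; cases h) (by intro y h; cases h)
  simp only [List.nil_append] at hsplit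
  rw [hsplit]
  -- within a bucket A's comparison is B's
  have hcongr : ∀ i : Nat, pvIns pvBfA [] (d.filter (fun x => pvCls x == i)) =
      pvIns pvBfB [] (d.filter (fun x => pvCls x == i)) := by
    intro i
    apply pvIns_congr
    intro a ha b hb
    have hai : pvCls a = i := by simpa using (List.of_mem_filter ha)
    have hbi : pvCls b = i := by
      rcases hb with hb | hb
      · simpa using (List.of_mem_filter hb)
      · cases hb
    exact pvBfA_eq_pvBfB a b (by rw [hai, hbi])
  rw [hcongr 0, hcongr 1, hcongr 2, hcongr 3]
  -- B's side: buckets then per-bucket sorts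
  unfold sort_officer_schedule_py_alt
  rw [pvBuckets_eq d (([], []), ([], []))]
  simp only [List.nil_append]
  rw [pvEmit_eq, pvEmit_eq, pvEmit_eq, pvEmit_eq]
  simp [List.append_assoc]
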